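-- pv_equiv track=rewrite | github.com/ghanteyyy/nppy | CodeWars/Form The Minimum.py | min_value
-- ===== SOURCE A (Python) =====
-- def min_value(digits):
--     no_duplicates = []
--
--     # Removing duplicates
--     for digit in digits:
--         if digit not in no_duplicates:
--             no_duplicates.append(digit)
--
--     # Sorting
--     length = len(no_duplicates)
--
--     for i in range(length):
--         for j in range(i + 1, length):
--             if no_duplicates[j] < no_duplicates[i]:
--                 no_duplicates[i], no_duplicates[j] = no_duplicates[j], no_duplicates[i]
--
--     # Concatenate
--     return int(''.join([str(digit) for digit in no_duplicates]))
-- ===== SOURCE B (Python) =====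
-- def min_value(digits):
--     # One pass: keep a sorted, duplicate-free list, binary-searching each value's slot.
--     uniq = []
--     for d in digits:
--         lo, hi = 0, len(uniq)
--         while lo < hi:                      # binary search for the insertion point
--             mid = (lo + hi) // 2
--             if uniq[mid] < d:
--                 lo = mid + 1
--             else:
--                 hi = mid
--         if lo == len(uniq) or uniq[lo] != d:
--             uniq.insert(lo, d)
--     return int(''.join(map(str, uniq)))
-- ===== Notes on version B (the rewrite author's own statement) =====
-- stated objective: alternative
-- what changed: Replaces A's two staged passes (first-occurrence dedup by list membership, then an O(n^2) index-swapping exchange sort) with a single pass that maintains a sorted duplicate-free accumulator, locating each value's slot by hand-written binary search and skipping values already present.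
import Mathlib
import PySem

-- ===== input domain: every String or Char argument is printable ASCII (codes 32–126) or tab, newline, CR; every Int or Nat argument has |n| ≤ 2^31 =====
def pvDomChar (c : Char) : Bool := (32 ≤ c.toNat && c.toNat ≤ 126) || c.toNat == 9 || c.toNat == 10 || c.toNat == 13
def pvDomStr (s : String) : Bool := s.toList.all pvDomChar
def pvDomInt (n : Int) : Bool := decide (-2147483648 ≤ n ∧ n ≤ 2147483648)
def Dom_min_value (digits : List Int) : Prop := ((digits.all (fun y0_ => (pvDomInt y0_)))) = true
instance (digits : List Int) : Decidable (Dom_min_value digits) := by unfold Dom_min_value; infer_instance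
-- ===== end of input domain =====

-- B replaces A's staged dedup pass + O(n²) exchange sort by ONE pass maintaining a sorted
-- duplicate-free accumulator with a hand-written binary search (alternative decomposition).

-- ===== PORT A =====
-- one inner-loop step of A's exchange sort: if a[j] < a[i], swap (the simultaneous assignment reads both first)
def pvSwapIf (l : List Int) (i j : Int) : List Int :=
  if PySem.List.pyGetD l j 0 < PySem.List.pyGetD l i 0 then
    PySem.List.pySetD (PySem.List.pySetD l i (PySem.List.pyGetD l j 0)) j (PySem.List.pyGetD l i 0)
  else l

def min_value (digits : List Int) : Int :=
  let no_duplicates := digits.foldl (fun acc digit => if acc.contains digit then acc else acc ++ [digit]) []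
  let length : Int := no_duplicates.length
  let sorted :=
    (PySem.List.pyRange 0 length 1).foldl (fun acc i =>
      (PySem.List.pyRange (i + 1) length 1).foldl (fun acc2 j => pvSwapIf acc2 i j) acc) no_duplicates
  -- int('') / int('-a-b') raises ValueError: those inputs are excluded by Pre_min_value
  (PySem.Int.ofStr? (PySem.Str.join "" (sorted.map (fun digit => PySem.Int.toStr digit)))).getD 0

-- ===== PORT B =====
-- B's while loop: binary search for the leftmost slot whose element is not < d
def pvBisect (uniq : List Int) (d : Int) (lo hi : Nat) : Nat :=
  if _h : lo < hi then
    -- mid = (lo + hi) // 2, inlined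
    if PySem.List.pyGetD uniq (((lo + hi) / 2 : Nat) : Int) 0 < d then pvBisect uniq d ((lo + hi) / 2 + 1) hi
    else pvBisect uniq d lo ((lo + hi) / 2)
  else lo
termination_by hi - lo
decreasing_by all_goals omega

-- B's loop body: insert d at the found slot unless it is already there
def pvStep (uniq : List Int) (d : Int) : List Int :=
  let lo := pvBisect uniq d 0 uniq.length
  if lo = uniq.length then PySem.List.insert uniq (lo : Int) d
  else if PySem.List.pyGetD uniq (lo : Int) 0 ≠ d then PySem.List.insert uniq (lo : Int) d
  else uniq

def min_value_alt (digits : List Int) : Int :=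
  let uniq := digits.foldl (fun u d => pvStep u d) []
  (PySem.Int.ofStr? (PySem.Str.join "" (uniq.map (fun d => PySem.Int.toStr d)))).getD 0

-- ===== PRECONDITION & SPEC =====
-- Pre_ excludes exactly the inputs where Python A raises ValueError in int(...): the empty list
-- (int('')) and lists with two distinct negative elements (a '-' sign lands mid-string).
def Pre_min_value (digits : List Int) : Prop :=
  digits ≠ [] ∧ ∀ a ∈ digits, ∀ b ∈ digits, a < 0 → b < 0 → a = b
instance (digits : List Int) : Decidable (Pre_min_value digits) := by unfold Pre_min_value; infer_instance

def pvWitness_min_value : List Int := [3, -1, 3, 0, 7]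

def Spec_min_value (digits : List Int) (out : Int) : Prop := out = min_value_alt digits
instance (digits : List Int) (out : Int) : Decidable (Spec_min_value digits out) := by unfold Spec_min_value; infer_instance

-- ===== CLAIM (what is proved, stated in full; the proofs are below) =====
def Claim_equal_min_value : Prop := ∀ (digits : List Int), Dom_min_value digits → Pre_min_value digits → Spec_min_value digits (min_value digits)

-- ===== LEMMAS AND PROOFS =====

-- ---------- A side: the exchange sort sorts ----------

-- pvSwapIf on in-range indices, written with getElem/set
lemma pvSwapIf_eq (l : List Int) (i j : Int) (hi : 0 ≤ i) (hj : 0 ≤ j)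
    (hiL : i < (l.length : Int)) (hjL : j < (l.length : Int)) :
    pvSwapIf l i j =
      if l[j.toNat]'(by omega) < l[i.toNat]'(by omega) then
        (l.set i.toNat (l[j.toNat]'(by omega))).set j.toNat (l[i.toNat]'(by omega))
      else l := by
  unfold pvSwapIf
  rw [PySem.List.pyGetD_eq_getElem l 0 hj hjL, PySem.List.pyGetD_eq_getElem l 0 hi hiL,
      PySem.List.pySetD_of_nonneg l _ hi, PySem.List.pySetD_of_nonneg _ _ hj]

-- A's inner loop (j from j₀ to n) leaves the prefix below i untouched, permutes the list,
-- and puts at position i a value ≤ the old a[i] and ≤ every element at positions j₀ … n-1.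
lemma pvInner_go (i n : Int) (hi : 0 ≤ i) :
    ∀ (m : Nat) (j : Int) (l : List Int), i < j → (n - j).toNat = m → (l.length : Int) = n →
    ∀ r, r = (PySem.List.pyRange j n 1).foldl (fun acc j' => pvSwapIf acc i j') l →
      r.length = l.length ∧ r.Perm l ∧ r.take i.toNat = l.take i.toNat ∧
      r.getD i.toNat 0 ≤ l.getD i.toNat 0 ∧ ∀ y ∈ l.drop j.toNat, r.getD i.toNat 0 ≤ y := by
  intro m
  induction m with
  | zero =>
    intro j l hij hm hl r hr
    rw [PySem.List.pyRange_one_eq_nil (by omega), List.foldl_nil] at hr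
    subst hr
    refine ⟨rfl, List.Perm.refl _, rfl, le_refl _, ?_⟩
    intro y hy
    rw [List.drop_eq_nil_of_le (by omega)] at hy
    exact absurd hy (List.not_mem_nil)
  | succ m ih =>
    intro j l hij hm hl r hr
    have hjn : j < n := by omega
    have hiL : i.toNat < l.length := by omega
    have hjL : j.toNat < l.length := by omega
    have hne : j.toNat ≠ i.toNat := by omega
    have htn : (j + 1).toNat = j.toNat + 1 := by omega
    rw [PySem.List.pyRange_one_cons hjn, List.foldl_cons,
        pvSwapIf_eq l i j hi (by omega) (by omega) (by omega)] at hr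
    by_cases hlt : l[j.toNat]'hjL < l[i.toNat]'hiL
    · rw [if_pos hlt] at hr
      set l' : List Int := (l.set i.toNat (l[j.toNat]'hjL)).set j.toNat (l[i.toNat]'hiL) with hl'
      have hlen' : l'.length = l.length := by simp [hl']
      have hperm' : l'.Perm l := List.set_set_perm hiL hjL
      have htake' : l'.take i.toNat = l.take i.toNat := by
        rw [hl', List.take_set_of_le (by omega), List.take_set_of_le (by omega)]
      have hget' : l'.getD i.toNat 0 = l[j.toNat]'hjL := by
        rw [List.getD_eq_getElem l' 0 (by omega)]
        rw [List.getElem_set_ne hne, List.getElem_set_self]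
      have hdrop' : l'.drop (j.toNat + 1) = l.drop (j.toNat + 1) := by
        rw [hl', List.drop_set_of_lt (by omega), List.drop_set_of_lt (by omega)]
      obtain ⟨L, P, T, G1, G2⟩ := ih (j + 1) l' (by omega) (by omega)
        (by rw [hlen']; exact hl) r hr
      refine ⟨L.trans hlen', P.trans hperm', T.trans htake', ?_, ?_⟩
      · calc r.getD i.toNat 0 ≤ l'.getD i.toNat 0 := G1
          _ = l[j.toNat]'hjL := hget'
          _ ≤ l.getD i.toNat 0 := by rw [List.getD_eq_getElem l 0 hiL]; exact le_of_lt hlt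
      · intro y hy
        rw [List.drop_eq_getElem_cons hjL] at hy
        rcases List.mem_cons.mp hy with hy | hy
        · subst hy; exact hget' ▸ G1
        · rw [← hdrop', ← htn] at hy
          exact G2 y hy
    · rw [if_neg hlt] at hr
      obtain ⟨L, P, T, G1, G2⟩ := ih (j + 1) l (by omega) (by omega) hl r hr
      refine ⟨L, P, T, G1, ?_⟩
      intro y hy
      rw [List.drop_eq_getElem_cons hjL] at hy
      rcases List.mem_cons.mp hy with hy | hy
      · subst hy
        calc r.getD i.toNat 0 ≤ l.getD i.toNat 0 := G1
          _ = l[i.toNat]'hiL := List.getD_eq_getElem l 0 hiL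
          _ ≤ l[j.toNat]'hjL := le_of_not_gt hlt
      · rw [← htn] at hy
        exact G2 y hy

-- A's outer loop, started at i with a sorted prefix bounding the suffix, returns a sorted permutation.
lemma pvOuter_go (n : Int) :
    ∀ (m : Nat) (i : Int) (l : List Int), 0 ≤ i → (n - i).toNat = m → (l.length : Int) = n →
    (l.take i.toNat).Pairwise (· ≤ ·) →
    (∀ x ∈ l.take i.toNat, ∀ y ∈ l.drop i.toNat, x ≤ y) →
    ∀ r, r = (PySem.List.pyRange i n 1).foldl (fun acc i' =>
        (PySem.List.pyRange (i' + 1) n 1).foldl (fun acc2 j => pvSwapIf acc2 i' j) acc) l →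
      r.Perm l ∧ r.Pairwise (· ≤ ·) := by
  intro m
  induction m with
  | zero =>
    intro i l hi hm hl hpw _ r hr
    rw [PySem.List.pyRange_one_eq_nil (by omega), List.foldl_nil] at hr
    subst hr
    rw [List.take_of_length_le (by omega)] at hpw
    exact ⟨List.Perm.refl _, hpw⟩
  | succ m ih =>
    intro i l hi hm hl hpw hinv r hr
    have hin : i < n := by omega
    have hiL : i.toNat < l.length := by omega
    have htn : (i + 1).toNat = i.toNat + 1 := by omega
    rw [PySem.List.pyRange_one_cons hin, List.foldl_cons] at hr
    -- r1 is the list after A's inner pass at index i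
    set r1 : List Int :=
      (PySem.List.pyRange (i + 1) n 1).foldl (fun acc2 j => pvSwapIf acc2 i j) l with hr1
    obtain ⟨L1, P1, T1, G1, G2⟩ := pvInner_go i n hi m (i + 1) l (by omega) (by omega) hl r1 hr1
    have hiR : i.toNat < r1.length := by omega
    set m0 : Int := r1.getD i.toNat 0 with hm0
    -- the minimum placed at position i bounds everything in the old suffix
    have hminAll : ∀ y ∈ l.drop i.toNat, m0 ≤ y := by
      intro y hy
      rw [List.drop_eq_getElem_cons hiL] at hy
      rcases List.mem_cons.mp hy with hy | hy
      · subst hy; exact (List.getD_eq_getElem l 0 hiL) ▸ G1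
      · rw [← htn] at hy; exact G2 y hy
    -- the suffixes from position i are permutations of each other
    have dropPerm : (r1.drop i.toNat).Perm (l.drop i.toNat) := by
      have h := P1
      rw [← List.take_append_drop i.toNat r1, ← List.take_append_drop i.toNat l, T1] at h
      exact (List.perm_append_left_iff _).mp h
    have hd : r1.drop i.toNat = m0 :: r1.drop (i.toNat + 1) := by
      rw [List.drop_eq_getElem_cons hiR, hm0, List.getD_eq_getElem r1 0 hiR]
    have hmem : m0 ∈ l.drop i.toNat := dropPerm.mem_iff.mp (by rw [hd]; exact List.mem_cons_self)
    have hsubmem : ∀ y ∈ r1.drop (i.toNat + 1), y ∈ l.drop i.toNat := by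
      intro y hy
      exact dropPerm.mem_iff.mp (by rw [hd]; exact List.mem_cons_of_mem _ hy)
    have htake1 : r1.take (i + 1).toNat = l.take i.toNat ++ [m0] := by
      rw [htn, List.take_add_one, T1, hm0, List.getD_eq_getElem r1 0 hiR]
      simp [List.getElem?_eq_getElem hiR]
    have hpw1 : (r1.take (i + 1).toNat).Pairwise (· ≤ ·) := by
      rw [htake1]
      refine List.pairwise_append.mpr ⟨hpw, List.pairwise_singleton _ _, ?_⟩
      intro x hx y hy
      rw [List.mem_singleton] at hy
      subst hy
      exact hinv x hx m0 hmem
    have hinv1 : ∀ x ∈ r1.take (i + 1).toNat, ∀ y ∈ r1.drop (i + 1).toNat, x ≤ y := by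
      intro x hx y hy
      rw [htn] at hy
      have hyl : y ∈ l.drop i.toNat := hsubmem y hy
      rw [htake1] at hx
      rcases List.mem_append.mp hx with hx | hx
      · exact hinv x hx y hyl
      · rw [List.mem_singleton] at hx; subst hx; exact hminAll y hyl
    obtain ⟨P, Pw⟩ := ih (i + 1) r1 (by omega) (by omega) (by rw [L1]; exact hl) hpw1 hinv1 r hr
    exact ⟨P.trans P1, Pw⟩

-- A's whole dedup + exchange sort equals the canonical sorted list of the distinct elements
lemma pvLists_eq (digits : List Int) :
    (PySem.List.pyRange 0 ((PySem.Set.ofList digits).length : Int) 1).foldl (fun acc i =>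
        (PySem.List.pyRange (i + 1) ((PySem.Set.ofList digits).length : Int) 1).foldl
          (fun acc2 j => pvSwapIf acc2 i j) acc) (PySem.Set.ofList digits)
      = PySem.List.sorted (PySem.Set.ofList digits) (fun x => x) false := by
  set nd : List Int := PySem.Set.ofList digits with hnd
  obtain ⟨P, Pw⟩ := pvOuter_go (nd.length : Int) (nd.length : Int).toNat 0 nd le_rfl rfl rfl
    (by simp) (by simp) _ rfl
  symm
  refine PySem.List.sorted_eq_of_perm_of_pairwise_lt _ _ _ P ?_
  have hnodup : (_ : List Int).Nodup := P.nodup_iff.mpr (PySem.Set.nodup_ofList digits)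
  exact (Pw.and hnodup).imp (fun h => lt_of_le_of_ne h.1 h.2)

-- ---------- B side: binary-search insertion builds the same sorted list ----------

-- B's binary search returns the leftmost slot whose element is not < d
lemma pvBisect_spec (uniq : List Int) (d : Int)
    (hpw : uniq.Pairwise (· < ·)) :
    ∀ (m lo hi : Nat), hi - lo = m → lo ≤ hi → hi ≤ uniq.length →
    (∀ k, k < uniq.length → k < lo → uniq.getD k 0 < d) →
    (∀ k, k < uniq.length → hi ≤ k → ¬ uniq.getD k 0 < d) →
    pvBisect uniq d lo hi ≤ uniq.length ∧
    (∀ k, k < uniq.length → k < pvBisect uniq d lo hi → uniq.getD k 0 < d) ∧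
    (pvBisect uniq d lo hi < uniq.length → ¬ uniq.getD (pvBisect uniq d lo hi) 0 < d) := by
  intro m
  induction m using Nat.strong_induction_on with
  | _ m ih =>
    intro lo hi hm hlohi hhi hbelow habove
    unfold pvBisect
    by_cases h : lo < hi
    · rw [dif_pos h]
      have hmidL : (lo + hi) / 2 < uniq.length := by omega
      have hgd : PySem.List.pyGetD uniq (((lo + hi) / 2 : Nat) : Int) 0
          = uniq.getD ((lo + hi) / 2) 0 := by
        rw [PySem.List.pyGetD_eq_getElem uniq 0 (by positivity) (by exact_mod_cast hmidL),
            List.getD_eq_getElem uniq 0 hmidL]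
        congr 1
      rw [hgd]
      have hmono : ∀ a b, a < uniq.length → b < uniq.length → a < b →
          uniq.getD a 0 < uniq.getD b 0 := by
        intro a b ha hb hab
        rw [List.getD_eq_getElem uniq 0 ha, List.getD_eq_getElem uniq 0 hb]
        exact List.pairwise_iff_getElem.mp hpw a b ha hb hab
      by_cases hc : uniq.getD ((lo + hi) / 2) 0 < d
      · rw [if_pos hc]
        refine ih (hi - ((lo + hi) / 2 + 1)) (by omega) _ _ rfl (by omega) hhi ?_ habove
        intro k hk hklt
        rcases Nat.lt_or_ge k ((lo + hi) / 2) with hkm | hkm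
        · exact lt_trans (hmono k ((lo + hi) / 2) hk hmidL hkm) hc
        · have : k = (lo + hi) / 2 := by omega
          subst this; exact hc
      · rw [if_neg hc]
        refine ih ((lo + hi) / 2 - lo) (by omega) _ _ rfl (by omega) (by omega) hbelow ?_
        intro k hk hkm
        rcases Nat.lt_or_ge k hi with hkh | hkh
        · intro hkd
          rcases Nat.lt_or_ge ((lo + hi) / 2) k with hx | hx
          · exact hc (lt_trans (hmono ((lo + hi) / 2) k hmidL hk hx) hkd)
          · have : k = (lo + hi) / 2 := by omega
            subst this; exact hc hkd
        · exact habove k hk hkh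
    · rw [dif_neg h]
      have : lo = hi := by omega
      subst this
      exact ⟨hhi, fun k hk hklt => hbelow k hk hklt, fun hk => habove _ hk le_rfl⟩

-- one B step keeps the accumulator strictly sorted and adds exactly d to its members
lemma pvStep_spec (uniq : List Int) (d : Int) (hpw : uniq.Pairwise (· < ·)) :
    (pvStep uniq d).Pairwise (· < ·) ∧ ∀ x, (x ∈ pvStep uniq d ↔ x = d ∨ x ∈ uniq) := by
  obtain ⟨hle, hbelow, habove⟩ :=
    pvBisect_spec uniq d hpw (uniq.length - 0) 0 uniq.length rfl (Nat.zero_le _) le_rfl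
      (by omega) (by intro k hk hk2; omega)
  set i : Nat := pvBisect uniq d 0 uniq.length with hi
  have hins : PySem.List.insert uniq (i : Int) d = uniq.take i ++ d :: uniq.drop i :=
    PySem.List.insert_natCast uniq i d hle
  have htake_lt : ∀ x ∈ uniq.take i, x < d := by
    intro x hx
    obtain ⟨k, hk, hkx⟩ := List.getElem_of_mem hx
    have hk' : k < i ∧ k < uniq.length := by
      have := hk
      rw [List.length_take] at this
      omega
    rw [List.getElem_take] at hkx
    have := hbelow k hk'.2 hk'.1
    rw [List.getD_eq_getElem uniq 0 hk'.2] at this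
    exact hkx ▸ this
  have hmem_ins : ∀ x, x ∈ uniq.take i ++ d :: uniq.drop i ↔ x = d ∨ x ∈ uniq := by
    intro x
    constructor
    · intro hx
      rcases List.mem_append.mp hx with hx | hx
      · exact Or.inr (List.mem_of_mem_take hx)
      · rcases List.mem_cons.mp hx with hx | hx
        · exact Or.inl hx
        · exact Or.inr (List.mem_of_mem_drop hx)
    · intro hx
      rcases hx with hx | hx
      · exact List.mem_append.mpr (Or.inr (List.mem_cons.mpr (Or.inl hx)))
      · rw [← List.take_append_drop i uniq] at hx
        rcases List.mem_append.mp hx with hx | hx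
        · exact List.mem_append.mpr (Or.inl hx)
        · exact List.mem_append.mpr (Or.inr (List.mem_cons.mpr (Or.inr hx)))
  have hpw_ins : (∀ y ∈ uniq.drop i, d < y) →
      (uniq.take i ++ d :: uniq.drop i).Pairwise (· < ·) := by
    intro hdrop
    refine List.pairwise_append.mpr ⟨hpw.take, ?_, ?_⟩
    · exact List.pairwise_cons.mpr ⟨hdrop, hpw.drop⟩
    · intro x hx y hy
      rcases List.mem_cons.mp hy with hy | hy
      · exact hy ▸ htake_lt x hx
      · exact lt_trans (htake_lt x hx) (hdrop y hy)
  unfold pvStep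
  rw [← hi]
  by_cases hend : i = uniq.length
  · rw [if_pos hend, hins]
    refine ⟨hpw_ins ?_, hmem_ins⟩
    intro y hy
    rw [hend, List.drop_length] at hy
    exact absurd hy (List.not_mem_nil)
  · rw [if_neg hend]
    have hiL : i < uniq.length := lt_of_le_of_ne hle hend
    have hgd : PySem.List.pyGetD uniq (i : Int) 0 = uniq.getD i 0 := by
      rw [PySem.List.pyGetD_eq_getElem uniq 0 (by positivity) (by exact_mod_cast hiL),
          List.getD_eq_getElem uniq 0 hiL]
      congr 1
    rw [hgd]
    by_cases hne : uniq.getD i 0 ≠ d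
    · rw [if_pos hne, hins]
      have hgt : d < uniq.getD i 0 := lt_of_le_of_ne (le_of_not_gt (habove hiL)) (Ne.symm hne)
      refine ⟨hpw_ins ?_, hmem_ins⟩
      have hdi : uniq.drop i = uniq.getD i 0 :: uniq.drop (i + 1) := by
        rw [List.drop_eq_getElem_cons hiL, List.getD_eq_getElem uniq 0 hiL]
      intro y hy
      rw [hdi] at hy
      rcases List.mem_cons.mp hy with hy | hy
      · exact hy ▸ hgt
      · have hpd : (uniq.drop i).Pairwise (· < ·) := hpw.drop
        rw [hdi] at hpd
        exact lt_trans hgt ((List.pairwise_cons.mp hpd).1 y hy)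
    · rw [if_neg hne]
      rw [not_not] at hne
      refine ⟨hpw, fun x => ⟨fun hx => Or.inr hx, fun hx => ?_⟩⟩
      rcases hx with hx | hx
      · rw [← hne, List.getD_eq_getElem uniq 0 hiL] at hx
        exact hx ▸ List.getElem_mem hiL
      · exact hx

-- B's whole fold: strictly sorted, members = members of acc ∪ digits
lemma pvFold_spec : ∀ (ds acc : List Int), acc.Pairwise (· < ·) →
    (ds.foldl (fun u d => pvStep u d) acc).Pairwise (· < ·) ∧
    ∀ x, (x ∈ ds.foldl (fun u d => pvStep u d) acc ↔ x ∈ acc ∨ x ∈ ds) := by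
  intro ds
  induction ds with
  | nil => intro acc h; exact ⟨h, fun x => by simp⟩
  | cons d ds ih =>
    intro acc h
    obtain ⟨h1, h2⟩ := pvStep_spec acc d h
    obtain ⟨g1, g2⟩ := ih (pvStep acc d) h1
    refine ⟨g1, fun x => ?_⟩
    rw [List.foldl_cons, g2 x, h2 x]
    constructor
    · rintro ((rfl | hx) | hx)
      · exact Or.inr (List.mem_cons_self)
      · exact Or.inl hx
      · exact Or.inr (List.mem_cons_of_mem _ hx)
    · rintro (hx | hx)
      · exact Or.inl (Or.inr hx)
      · rcases List.mem_cons.mp hx with rfl | hx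
        · exact Or.inl (Or.inl rfl)
        · exact Or.inr hx

-- B's accumulator equals the same canonical sorted list
lemma pvAltList_eq (digits : List Int) :
    digits.foldl (fun u d => pvStep u d) []
      = PySem.List.sorted (PySem.Set.ofList digits) (fun x => x) false := by
  obtain ⟨Pw, M⟩ := pvFold_spec digits [] (List.Pairwise.nil)
  symm
  refine PySem.List.sorted_eq_of_perm_of_pairwise_lt _ _ _ ?_ Pw
  refine (List.perm_ext_iff_of_nodup (Pw.imp (fun h => ne_of_lt h)) (PySem.Set.nodup_ofList digits)).mpr ?_
  intro a
  rw [M a, PySem.Set.mem_ofList]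
  simp

-- ===== VERDICT (by name: the statement is the Claim_ definition above) =====
theorem min_value_spec : Claim_equal_min_value := by
  intro digits _ _
  unfold Spec_min_value min_value min_value_alt
  have hdedup : digits.foldl (fun acc digit => if acc.contains digit then acc else acc ++ [digit]) []
      = PySem.Set.ofList digits := by
    rw [PySem.Set.ofList_eq_foldl]; rfl
  simp only [hdedup, pvLists_eq digits, pvAltList_eq digits]
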